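-- pv_equiv track=rewrite | github.com/AlphastT101/luminaryai-old | bot_utilities/ai_utils.py | detect_nsfw_request
-- ===== SOURCE A (Python) =====
-- def detect_nsfw_request(query):
--     nsfw_keywords = [
--         'nsfw', 'adult', 'explicit', '18+', 'porn', 'xxx', 'sexual', 'indecent', 'lewd',
--         'obscene', 'raunchy', 'risqué', 'sensual', 'vulgar', 'naughty', 'kinky', 'dirty',
--         'lustful', 'provocative', 'stimulating', 'sultry', 'titillating', 'unwholesome',
--         'filthy', 'smutty', 'offensive', 'lascivious', 'carnal', 'salacious', 'X-rated',
--         'prurient', 'perverted', 'lecherous', 'horny', 'fetish', 'erogenous', 'nude',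
--         'sordid', 'scandalous', 'private parts', 'intimate areas', 'sensitive anatomy',
--         'naked','boob','boobies','anal','dick','fucker','fuck','fucking','without clothes','pornhub','blowjob','cum','boobjob','xxxx','xxxxx','xxxxxxx','xxxxxxxx'
--     ]
--
--
--     # Convert query to lowercase for case-insensitive matching
--     query_lower = query.lower()
--
--     # Check if any NSFW keyword is present in the query
--     for keyword in nsfw_keywords:
--         if keyword in query_lower:
--             return True  # NSFW request detected
--
--     return False  # Safe request
-- ===== SOURCE B (Python) =====
-- # Precompute a first-character index over the keyword list once; per query, do one
-- # left-to-right pass and only test the keywords whose first character matches.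
-- NSFW_PATTERN = (
--     'nsfw|adult|explicit|18+|porn|xxx|sexual|indecent|lewd|'
--     'obscene|raunchy|risqué|sensual|vulgar|naughty|kinky|dirty|'
--     'lustful|provocative|stimulating|sultry|titillating|unwholesome|'
--     'filthy|smutty|offensive|lascivious|carnal|salacious|X-rated|'
--     'prurient|perverted|lecherous|horny|fetish|erogenous|nude|'
--     'sordid|scandalous|private parts|intimate areas|sensitive anatomy|'
--     'naked|boob|boobies|anal|dick|fucker|fuck|fucking|without clothes|'
--     'pornhub|blowjob|cum|boobjob|xxxx|xxxxx|xxxxxxx|xxxxxxxx'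
-- )
--
-- NSFW_INDEX = {}
-- for _k in NSFW_PATTERN.split('|'):
--     NSFW_INDEX[_k[0]] = NSFW_INDEX.get(_k[0], []) + [_k]
--
--
-- def detect_nsfw_request(query):
--     q = query.lower()
--     for i in range(len(q)):
--         for k in NSFW_INDEX.get(q[i], []):
--             if q.startswith(k, i):
--                 return True
--     return False
-- ===== Notes on version B (the rewrite author's own statement) =====
-- stated objective: alternative
-- what changed: A scans the whole lowered query once per keyword (59 independent substring searches with early return); B precomputes a dict indexing the keywords by their first character (from a single joined pattern string split at import time), then makes one left-to-right pass over the lowered query, at each position testing only the keywords whose first character matches the character there.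
import Mathlib
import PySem

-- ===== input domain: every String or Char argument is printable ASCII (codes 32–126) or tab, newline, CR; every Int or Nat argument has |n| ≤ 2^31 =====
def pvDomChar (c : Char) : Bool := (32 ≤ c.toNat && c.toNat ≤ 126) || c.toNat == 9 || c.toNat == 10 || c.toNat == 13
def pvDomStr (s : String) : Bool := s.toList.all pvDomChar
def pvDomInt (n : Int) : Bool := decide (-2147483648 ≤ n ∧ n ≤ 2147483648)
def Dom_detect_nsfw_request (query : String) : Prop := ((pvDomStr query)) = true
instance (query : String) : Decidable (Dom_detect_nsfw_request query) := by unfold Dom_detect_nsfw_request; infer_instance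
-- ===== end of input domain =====

-- B precomputes a first-character index over the keywords and makes one left-to-right
-- pass over the lowered query, testing only keywords whose first char matches (objective: alternative).


-- ===== PORT A =====
-- A's keyword list literal
def nsfwKeywords : List String := [
  "nsfw", "adult", "explicit", "18+", "porn", "xxx", "sexual", "indecent", "lewd",
  "obscene", "raunchy", "risqué", "sensual", "vulgar", "naughty", "kinky", "dirty",
  "lustful", "provocative", "stimulating", "sultry", "titillating", "unwholesome",
  "filthy", "smutty", "offensive", "lascivious", "carnal", "salacious", "X-rated",
  "prurient", "perverted", "lecherous", "horny", "fetish", "erogenous", "nude",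
  "sordid", "scandalous", "private parts", "intimate areas", "sensitive anatomy",
  "naked", "boob", "boobies", "anal", "dick", "fucker", "fuck", "fucking",
  "without clothes", "pornhub", "blowjob", "cum", "boobjob", "xxxx", "xxxxx",
  "xxxxxxx", "xxxxxxxx"]

-- A's loop: for keyword in nsfw_keywords: if keyword in query_lower: return True; return False
def detectLoopA (qlow : String) : List String → Bool
  | [] => false
  | k :: rest => if PySem.Str.isIn k qlow then true else detectLoopA qlow rest

def detect_nsfw_request (query : String) : Bool :=
  detectLoopA (PySem.Str.lower query) nsfwKeywords

-- ===== PORT B =====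
-- B's '|'-joined keyword data (NSFW_PATTERN in Source B)
def nsfwPattern : String :=
  "nsfw|adult|explicit|18+|porn|xxx|sexual|indecent|lewd|obscene|raunchy|risqué|sensual|vulgar|naughty|kinky|dirty|lustful|provocative|stimulating|sultry|titillating|unwholesome|filthy|smutty|offensive|lascivious|carnal|salacious|X-rated|prurient|perverted|lecherous|horny|fetish|erogenous|nude|sordid|scandalous|private parts|intimate areas|sensitive anatomy|naked|boob|boobies|anal|dick|fucker|fuck|fucking|without clothes|pornhub|blowjob|cum|boobjob|xxxx|xxxxx|xxxxxxx|xxxxxxxx"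

-- NSFW_PATTERN.split('|'), on the char-list side
def nsfwKeys : List (List Char) := PySem.Chars.splitOn nsfwPattern.toList "|".toList

-- the build loop: for k in keys: index[k[0]] = index.get(k[0], []) + [k]
-- (k[0] via headD ' ': every split piece is nonempty, so the default is never used)
def nsfwIndex : PySem.Dict Char (List (List Char)) :=
  (nsfwKeys.map (fun k => (k.headD ' ', k))).foldl
    (fun d p => d.modify p.1 [] (· ++ [p.2])) PySem.Dict.empty

-- B's scan: for i in range(len(q)): for k in NSFW_INDEX.get(q[i], []): if q.startswith(k, i): return True
def scanIdxB (d : PySem.Dict Char (List (List Char))) : List Char → Bool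
  | [] => false
  | c :: t => (d.getD c []).any (fun k => PySem.Chars.startswith (c :: t) k) || scanIdxB d t

def detect_nsfw_request_alt (query : String) : Bool :=
  scanIdxB nsfwIndex (PySem.Str.lower query).toList

-- ===== PRECONDITION & SPEC =====
def Spec_detect_nsfw_request (query : String) (out : Bool) : Prop := out = detect_nsfw_request_alt query
instance (query : String) (out : Bool) : Decidable (Spec_detect_nsfw_request query out) := by unfold Spec_detect_nsfw_request; infer_instance

-- ===== CLAIM (what is proved, stated in full; the proofs are below) =====
def Claim_equal_detect_nsfw_request : Prop := ∀ (query : String), Dom_detect_nsfw_request query → Spec_detect_nsfw_request query (detect_nsfw_request query)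

-- ===== LEMMAS AND PROOFS =====

-- splitting B's pattern yields exactly A's keyword list
set_option maxRecDepth 8192 in
set_option maxHeartbeats 2000000 in
theorem nsfwKeys_eq : nsfwKeys = nsfwKeywords.map String.toList := by decide

-- no keyword is empty
set_option maxRecDepth 8192 in
set_option maxHeartbeats 2000000 in
theorem nsfwKeys_ne_nil : ∀ k ∈ nsfwKeys, k ≠ [] := by decide

-- the index groups the keywords by first character
theorem nsfwIndex_getD (c : Char) :
    nsfwIndex.getD c [] = nsfwKeys.filter (fun k => k.headD ' ' == c) := by
  unfold nsfwIndex
  rw [PySem.Dict.getD_foldl_modify_append]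
  simp [PySem.Dict.getD_empty, List.filter_map, Function.comp_def]

-- A's loop returns true iff some keyword is a substring (infix) of the lowered query
theorem detectLoopA_iff (q : String) (ks : List String) :
    detectLoopA q ks = true ↔ ∃ k ∈ ks, k.toList <:+: q.toList := by
  induction ks with
  | nil => simp [detectLoopA]
  | cons k rest ih =>
    simp only [detectLoopA]
    by_cases h : PySem.Str.isIn k q = true
    · rw [if_pos h]
      simp only [true_iff]
      exact ⟨k, List.mem_cons_self, (PySem.Str.isIn_iff_infix k q).mp h⟩
    · rw [if_neg h, ih]
      constructor
      · rintro ⟨x, hx, hinf⟩; exact ⟨x, List.mem_cons_of_mem _ hx, hinf⟩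
      · rintro ⟨x, hx, hinf⟩
        rcases List.mem_cons.mp hx with rfl | hx
        · exact absurd ((PySem.Str.isIn_iff_infix x q).mpr hinf) h
        · exact ⟨x, hx, hinf⟩

-- B's scan returns true iff some keyword with matching first char is a prefix of some suffix
theorem scanIdxB_iff (cs : List Char) :
    scanIdxB nsfwIndex cs = true ↔
      ∃ k ∈ nsfwKeys, ∃ s, s <:+ cs ∧ k <+: s ∧ k.headD ' ' = s.headD ' ' := by
  induction cs with
  | nil =>
    simp only [scanIdxB]
    constructor
    · intro h; exact absurd h (by simp)
    · rintro ⟨k, hk, s, hs, hp, _⟩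
      exact absurd hp (by simp [List.suffix_nil.mp hs, List.prefix_nil,
        nsfwKeys_ne_nil k hk])
  | cons c t ih =>
    simp only [scanIdxB, Bool.or_eq_true, List.any_eq_true,
      PySem.Chars.startswith_iff, nsfwIndex_getD, List.mem_filter, beq_iff_eq, ih]
    constructor
    · rintro (⟨k, ⟨hk, hc⟩, hp⟩ | ⟨k, hk, s, hs, hp, hh⟩)
      · exact ⟨k, hk, c :: t, List.suffix_refl _, hp, by simp [List.headD] at hc ⊢; exact hc⟩
      · exact ⟨k, hk, s, hs.trans (List.suffix_cons c t), hp, hh⟩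
    · rintro ⟨k, hk, s, hs, hp, hh⟩
      rcases List.suffix_cons_iff.mp hs with h | h
      · exact Or.inl ⟨k, ⟨hk, by subst h; simpa using hh⟩, by simpa [h] using hp⟩
      · exact Or.inr ⟨k, hk, s, h, hp, hh⟩

-- a nonempty prefix fixes the head of its suffix
theorem headD_eq_of_prefix {k s : List Char} (hk : k ≠ []) (hp : k <+: s) :
    k.headD ' ' = s.headD ' ' := by
  rcases k with _ | ⟨c, k'⟩
  · exact absurd rfl hk
  · rcases hp with ⟨t, rfl⟩; rfl

-- ===== VERDICT (by name: the statement is the Claim_ definition above) =====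
theorem detect_nsfw_request_spec : Claim_equal_detect_nsfw_request := by
  intro query _
  show detect_nsfw_request query = detect_nsfw_request_alt query
  unfold detect_nsfw_request detect_nsfw_request_alt
  rw [Bool.eq_iff_iff, detectLoopA_iff, scanIdxB_iff]
  constructor
  · rintro ⟨k, hk, hinf⟩
    have hk' : k.toList ∈ nsfwKeys := by rw [nsfwKeys_eq]; exact List.mem_map_of_mem hk
    rcases List.infix_iff_prefix_suffix.mp hinf with ⟨s, hp, hs⟩
    exact ⟨k.toList, hk', s, hs, hp,
      headD_eq_of_prefix (nsfwKeys_ne_nil _ hk') hp⟩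
  · rintro ⟨kl, hkl, s, hs, hp, _⟩
    rw [nsfwKeys_eq] at hkl
    rcases List.mem_map.mp hkl with ⟨k, hk, rfl⟩
    exact ⟨k, hk, List.infix_iff_prefix_suffix.mpr ⟨s, hp, hs⟩⟩
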